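-- pv_equiv track=rewrite | github.com/Vladimir-82/code_wars_4 | Bowling_Pins.py | bowling_pins
-- ===== SOURCE A (Python) =====
-- def bowling_pins(arr):
--    '''
--    Bowling Pins
--    '''
--    full_field = 'I I I I\n I I I \n  I I  \n   I   '
--    numbers_field = '7 8 9 0\n 4 5 6 \n  2 3  \n   1   '
--
--    for i in range(len(arr)):
--       if arr[i] == 10:
--          arr[i] = 0
--    arr = [str(i) for i in arr]
--
--
--    for i in arr:
--       if i in numbers_field:
--          pos = numbers_field.find(i)
--          full_field = full_field[:pos] + ' ' + full_field[pos+1:]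
--
--    return full_field
-- ===== SOURCE B (Python) =====
-- def bowling_pins(arr):
--     '''
--     Bowling Pins
--     '''
--     numbers_field = '7 8 9 0\n 4 5 6 \n  2 3  \n   1   '
--     for i in range(len(arr)):
--         if arr[i] == 10:
--             arr[i] = 0
--     knocked = {str(v) for v in arr}
--     return ''.join(' ' if c in knocked else ('I' if c in '0123456789' else c)
--                    for c in numbers_field)
-- ===== Notes on version B (the rewrite author's own statement) =====
-- stated objective: simpler
-- what changed: Replaces A's per-pin find-and-splice loop that repeatedly rebuilds the field string with one set of knocked labels and a single template-driven pass emitting ' ', 'I' or the separator per character.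
import Mathlib
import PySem

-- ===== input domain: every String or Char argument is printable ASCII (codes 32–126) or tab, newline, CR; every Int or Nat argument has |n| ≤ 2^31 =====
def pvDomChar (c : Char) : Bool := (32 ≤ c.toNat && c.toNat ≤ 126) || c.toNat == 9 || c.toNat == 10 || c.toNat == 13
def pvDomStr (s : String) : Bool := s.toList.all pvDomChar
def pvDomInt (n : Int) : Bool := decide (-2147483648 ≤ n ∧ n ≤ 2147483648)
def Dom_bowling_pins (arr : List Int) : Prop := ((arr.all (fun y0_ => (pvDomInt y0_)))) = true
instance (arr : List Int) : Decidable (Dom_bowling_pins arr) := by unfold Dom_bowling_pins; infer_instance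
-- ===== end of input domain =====

-- B replaces A's per-pin find-and-splice loop (which rebuilds the field string once per knocked pin)
-- with one set of knocked labels and a single template-driven pass over the numbers field (objective:
-- simpler).  A mutates its argument in place (10 -> 0); B performs the same mutation, and the
-- equivalence proved here is about the return value.

-- ===== PORT A =====
def bowling_pins (arr : List Int) : String :=
  let full_field := "I I I I\n I I I \n  I I  \n   I   "
  let numbers_field := "7 8 9 0\n 4 5 6 \n  2 3  \n   1   "
  let arr1 := (PySem.List.pyRange 0 (PySem.List.len arr) 1).foldl
    (fun a i => if PySem.List.pyGetD a i 0 = 10 then PySem.List.pySetD a i 0 else a) arr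
  let strs := arr1.map PySem.Int.toStr
  let res : List Char := strs.foldl
    (fun field s =>
      if PySem.Chars.isIn s.toList numbers_field.toList then
        let pos := PySem.Chars.find numbers_field.toList s.toList
        PySem.List.slice field none (some pos) ++ [' '] ++ PySem.List.slice field (some (pos + 1)) none
      else field)
    full_field.toList
  String.ofList res

-- ===== PORT B =====
def bowling_pins_alt (arr : List Int) : String :=
  let numbers_field := "7 8 9 0\n 4 5 6 \n  2 3  \n   1   "
  let arr1 := (PySem.List.pyRange 0 (PySem.List.len arr) 1).foldl
    (fun a i => if PySem.List.pyGetD a i 0 = 10 then PySem.List.pySetD a i 0 else a) arr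
  let knocked := PySem.Set.ofList (arr1.map PySem.Int.toStr)
  String.ofList (numbers_field.toList.map (fun c =>
    if PySem.Set.contains knocked (String.ofList [c]) then ' '
    else if PySem.Chars.isIn [c] "0123456789".toList then 'I' else c))

-- ===== PRECONDITION & SPEC =====
def Spec_bowling_pins (arr : List Int) (out : String) : Prop := out = bowling_pins_alt arr
instance (arr : List Int) (out : String) : Decidable (Spec_bowling_pins arr out) := by unfold Spec_bowling_pins; infer_instance

-- ===== CLAIM (what is proved, stated in full; the proofs are below) =====
def Claim_equal_bowling_pins : Prop := ∀ (arr : List Int), Dom_bowling_pins arr → Spec_bowling_pins arr (bowling_pins arr)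

-- ===== LEMMAS AND PROOFS =====

-- the numbers field as an explicit character list
def pvT : List Char :=
  ['7', ' ', '8', ' ', '9', ' ', '0', '\n', ' ', '4', ' ', '5', ' ', '6', ' ', '\n',
   ' ', ' ', '2', ' ', '3', ' ', ' ', '\n', ' ', ' ', ' ', '1', ' ', ' ', ' ']

-- what B emits for a character whose pin is still standing
def pvBase (c : Char) : Char := if PySem.Chars.isIn [c] "0123456789".toList then 'I' else c

-- the field character at template position c after the pins in p have been knocked down
def pvG (p : List Int) (c : Char) : Char :=
  if ∃ v ∈ p, PySem.Int.toChars v = [c] then ' ' else pvBase c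

-- one iteration of A's second loop
def pvStepA (field : List Char) (s : String) : List Char :=
  if PySem.Chars.isIn s.toList pvT then
    let pos := PySem.Chars.find pvT s.toList
    PySem.List.slice field none (some pos) ++ [' '] ++ PySem.List.slice field (some (pos + 1)) none
  else field

lemma pv_digitChar_isDigit (n : Nat) (h : n < 10) : (Nat.digitChar n).isDigit = true := by
  interval_cases n <;> decide

lemma pv_toDigitsCore_digits : ∀ (f n : Nat) (l : List Char),
    (∀ c ∈ l, c.isDigit = true) → ∀ c ∈ Nat.toDigitsCore 10 f n l, c.isDigit = true := by
  intro f
  induction f with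
  | zero => intro n l hl c hc; rw [Nat.toDigitsCore] at hc; exact hl c hc
  | succ f ih =>
    intro n l hl c hc
    have hl' : ∀ c ∈ (Nat.digitChar (n % 10) :: l), c.isDigit = true := by
      intro c2 hc2
      rcases List.mem_cons.1 hc2 with h | h
      · rw [h]; exact pv_digitChar_isDigit _ (Nat.mod_lt _ (by omega))
      · exact hl _ h
    rw [Nat.toDigitsCore] at hc
    split at hc
    · exact hl' _ hc
    · exact ih _ _ hl' _ hc

lemma pv_toDigitsCore_len : ∀ (f n : Nat) (l : List Char),
    l.length ≤ (Nat.toDigitsCore 10 f n l).length := by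
  intro f
  induction f with
  | zero => intro n l; simp [Nat.toDigitsCore]
  | succ f ih =>
    intro n l
    rw [Nat.toDigitsCore]
    split
    · simp
    · exact le_trans (by simp) (ih (n / 10) (Nat.digitChar (n % 10) :: l))

lemma pv_toDigits_two_le (n : Nat) (h : 10 ≤ n) : 2 ≤ (Nat.toDigits 10 n).length := by
  obtain ⟨m, rfl⟩ : ∃ m, n = m + 1 := ⟨n - 1, by omega⟩
  rw [Nat.toDigits, Nat.toDigitsCore]
  have h1 : ¬ (m + 1) / 10 = 0 := by omega
  rw [if_neg h1]
  obtain ⟨k, hk⟩ : ∃ k, m + 1 = k + 1 := ⟨m, rfl⟩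
  rw [show m + 1 = k + 1 from hk] at *
  rw [Nat.toDigitsCore]
  split
  · simp
  · exact le_trans (by simp) (pv_toDigitsCore_len k _ _)

lemma pv_toDigits_digits (n : Nat) : ∀ c ∈ Nat.toDigits 10 n, c.isDigit = true := by
  intro c hc
  exact pv_toDigitsCore_digits (n + 1) n [] (by simp) c hc

-- the only strings str(v) occurring inside the numbers field are the single digits "0".."9"
lemma pv_isIn_toChars (v : Int) (h : PySem.Chars.isIn (PySem.Int.toChars v) pvT = true) :
    0 ≤ v ∧ v ≤ 9 := by
  rw [PySem.Chars.isIn_iff_infix] at h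
  rcases lt_or_ge v 0 with hv | hv
  · exfalso
    have hmem : '-' ∈ pvT := h.subset (by simp [PySem.Int.toChars, if_pos hv])
    exact absurd hmem (by decide)
  · refine ⟨hv, ?_⟩
    by_contra h9
    have h10 : (10 : Nat) ≤ v.toNat := by omega
    have he : PySem.Int.toChars v = Nat.toDigits 10 v.toNat := by
      simp [PySem.Int.toChars, not_lt.2 hv]
    rw [he] at h
    have hlen := pv_toDigits_two_le v.toNat h10
    have hdig := pv_toDigits_digits v.toNat
    rcases hl : Nat.toDigits 10 v.toNat with _ | ⟨c1, _ | ⟨c2, r⟩⟩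
    · rw [hl] at hlen; simp at hlen
    · rw [hl] at hlen; simp at hlen
    · rw [hl] at h hdig
      obtain ⟨s, t, hst⟩ := h
      have hst' : s ++ c1 :: c2 :: (r ++ t) = pvT := by rw [← hst]; simp
      have h1 : pvT[s.length]? = some c1 := by
        rw [← hst', List.getElem?_append_right (le_refl _)]
        simp
      have h2 : pvT[s.length + 1]? = some c2 := by
        rw [← hst', List.getElem?_append_right (by omega)]
        simp
      obtain ⟨hlt2, -⟩ := List.getElem?_eq_some_iff.1 h2
      have hL : pvT.length = 31 := rfl
      rw [hL] at hlt2
      have hb : ∀ i, i < 30 → (pvT[i]?.getD 'x').isDigit = false ∨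
          (pvT[i + 1]?.getD 'x').isDigit = false := by decide
      rcases hb s.length (by omega) with h' | h'
      · rw [h1] at h'
        rw [Option.getD_some, hdig c1 (by simp)] at h'
        exact absurd h' (by simp)
      · rw [h2] at h'
        rw [Option.getD_some, hdig c2 (by simp)] at h'
        exact absurd h' (by simp)

lemma pvG_append_ne (p : List Int) (v : Int) (c : Char) (h : PySem.Int.toChars v ≠ [c]) :
    pvG (p ++ [v]) c = pvG p c := by
  unfold pvG
  refine if_congr ?_ rfl rfl
  constructor
  · rintro ⟨x, hx, he⟩
    rcases List.mem_append.1 hx with hx | hx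
    · exact ⟨x, hx, he⟩
    · rw [List.mem_singleton] at hx; subst hx; exact absurd he h
  · rintro ⟨x, hx, he⟩
    exact ⟨x, List.mem_append_left _ hx, he⟩

lemma pvG_append_self (p : List Int) (v : Int) (c : Char) (h : PySem.Int.toChars v = [c]) :
    pvG (p ++ [v]) c = ' ' := by
  unfold pvG
  rw [if_pos ⟨v, by simp, h⟩]

-- splicing a blank at index k is List.set
lemma pv_splice (l : List Char) (k : Nat) (a : Char) (hk : k < l.length) :
    l.take k ++ a :: l.drop (k + 1) = l.set k a := by
  rw [List.set_eq_take_append_cons_drop, if_pos hk]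

lemma pv_set_eq_map (p : List Int) (v : Int) (d : Char) (P : Nat)
    (hd : PySem.Int.toChars v = [d]) (hP : P < pvT.length) (hPd : pvT[P] = d)
    (huniq : ∀ i, (_ : i < pvT.length) → i ≠ P → pvT[i] ≠ d) :
    (pvT.map (pvG p)).set P ' ' = pvT.map (pvG (p ++ [v])) := by
  apply List.ext_getElem
  · simp
  · intro i h1 h2
    have hi : i < pvT.length := by simpa using h2
    rw [List.getElem_set]
    by_cases hiP : P = i
    · subst hiP
      rw [if_pos rfl, List.getElem_map]
      exact (pvG_append_self p v _ (by rw [hPd]; exact hd)).symm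
    · rw [if_neg hiP, List.getElem_map, List.getElem_map]
      have hne : PySem.Int.toChars v ≠ [pvT[i]] := by
        rw [hd]
        intro he
        have hdi : pvT[i] = d := by injection he with h'; exact h'.symm
        exact huniq i hi (fun hEq => hiP hEq.symm) hdi
      exact (pvG_append_ne p v _ hne).symm

-- one step of A's loop updates the rendered field by one more knocked pin
lemma pvStep_eq (p : List Int) (v : Int) :
    pvStepA (pvT.map (pvG p)) (PySem.Int.toStr v) = pvT.map (pvG (p ++ [v])) := by
  by_cases h : PySem.Chars.isIn (PySem.Int.toChars v) pvT = true
  · obtain ⟨h0, h9⟩ := pv_isIn_toChars v h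
    interval_cases v
    · have hd : PySem.Int.toChars (0 : Int) = ['0'] := by decide
      simp only [pvStepA, PySem.Int.toList_toStr, hd,
        show PySem.Chars.isIn ['0'] pvT = true from by decide,
        show PySem.Chars.find pvT ['0'] = (6 : Int) from by decide, if_true]
      rw [PySem.List.slice_to _ (by norm_num), PySem.List.slice_from _ (by norm_num)]
      norm_num
      rw [show Int.toNat 6 = 6 from rfl, show Int.toNat 7 = 7 from rfl]
      have hs := pv_splice (List.map (pvG p) pvT) 6 ' ' (by simp [pvT])
      norm_num at hs
      rw [hs]
      exact pv_set_eq_map p 0 '0' 6 hd (by decide) (by decide) (by decide)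
    · have hd : PySem.Int.toChars (1 : Int) = ['1'] := by decide
      simp only [pvStepA, PySem.Int.toList_toStr, hd,
        show PySem.Chars.isIn ['1'] pvT = true from by decide,
        show PySem.Chars.find pvT ['1'] = (27 : Int) from by decide, if_true]
      rw [PySem.List.slice_to _ (by norm_num), PySem.List.slice_from _ (by norm_num)]
      norm_num
      rw [show Int.toNat 27 = 27 from rfl, show Int.toNat 28 = 28 from rfl]
      have hs := pv_splice (List.map (pvG p) pvT) 27 ' ' (by simp [pvT])
      norm_num at hs
      rw [hs]
      exact pv_set_eq_map p 1 '1' 27 hd (by decide) (by decide) (by decide)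
    · have hd : PySem.Int.toChars (2 : Int) = ['2'] := by decide
      simp only [pvStepA, PySem.Int.toList_toStr, hd,
        show PySem.Chars.isIn ['2'] pvT = true from by decide,
        show PySem.Chars.find pvT ['2'] = (18 : Int) from by decide, if_true]
      rw [PySem.List.slice_to _ (by norm_num), PySem.List.slice_from _ (by norm_num)]
      norm_num
      rw [show Int.toNat 18 = 18 from rfl, show Int.toNat 19 = 19 from rfl]
      have hs := pv_splice (List.map (pvG p) pvT) 18 ' ' (by simp [pvT])
      norm_num at hs
      rw [hs]
      exact pv_set_eq_map p 2 '2' 18 hd (by decide) (by decide) (by decide)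
    · have hd : PySem.Int.toChars (3 : Int) = ['3'] := by decide
      simp only [pvStepA, PySem.Int.toList_toStr, hd,
        show PySem.Chars.isIn ['3'] pvT = true from by decide,
        show PySem.Chars.find pvT ['3'] = (20 : Int) from by decide, if_true]
      rw [PySem.List.slice_to _ (by norm_num), PySem.List.slice_from _ (by norm_num)]
      norm_num
      rw [show Int.toNat 20 = 20 from rfl, show Int.toNat 21 = 21 from rfl]
      have hs := pv_splice (List.map (pvG p) pvT) 20 ' ' (by simp [pvT])
      norm_num at hs
      rw [hs]
      exact pv_set_eq_map p 3 '3' 20 hd (by decide) (by decide) (by decide)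
    · have hd : PySem.Int.toChars (4 : Int) = ['4'] := by decide
      simp only [pvStepA, PySem.Int.toList_toStr, hd,
        show PySem.Chars.isIn ['4'] pvT = true from by decide,
        show PySem.Chars.find pvT ['4'] = (9 : Int) from by decide, if_true]
      rw [PySem.List.slice_to _ (by norm_num), PySem.List.slice_from _ (by norm_num)]
      norm_num
      rw [show Int.toNat 9 = 9 from rfl, show Int.toNat 10 = 10 from rfl]
      have hs := pv_splice (List.map (pvG p) pvT) 9 ' ' (by simp [pvT])
      norm_num at hs
      rw [hs]
      exact pv_set_eq_map p 4 '4' 9 hd (by decide) (by decide) (by decide)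
    · have hd : PySem.Int.toChars (5 : Int) = ['5'] := by decide
      simp only [pvStepA, PySem.Int.toList_toStr, hd,
        show PySem.Chars.isIn ['5'] pvT = true from by decide,
        show PySem.Chars.find pvT ['5'] = (11 : Int) from by decide, if_true]
      rw [PySem.List.slice_to _ (by norm_num), PySem.List.slice_from _ (by norm_num)]
      norm_num
      rw [show Int.toNat 11 = 11 from rfl, show Int.toNat 12 = 12 from rfl]
      have hs := pv_splice (List.map (pvG p) pvT) 11 ' ' (by simp [pvT])
      norm_num at hs
      rw [hs]
      exact pv_set_eq_map p 5 '5' 11 hd (by decide) (by decide) (by decide)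
    · have hd : PySem.Int.toChars (6 : Int) = ['6'] := by decide
      simp only [pvStepA, PySem.Int.toList_toStr, hd,
        show PySem.Chars.isIn ['6'] pvT = true from by decide,
        show PySem.Chars.find pvT ['6'] = (13 : Int) from by decide, if_true]
      rw [PySem.List.slice_to _ (by norm_num), PySem.List.slice_from _ (by norm_num)]
      norm_num
      rw [show Int.toNat 13 = 13 from rfl, show Int.toNat 14 = 14 from rfl]
      have hs := pv_splice (List.map (pvG p) pvT) 13 ' ' (by simp [pvT])
      norm_num at hs
      rw [hs]
      exact pv_set_eq_map p 6 '6' 13 hd (by decide) (by decide) (by decide)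
    · have hd : PySem.Int.toChars (7 : Int) = ['7'] := by decide
      simp only [pvStepA, PySem.Int.toList_toStr, hd,
        show PySem.Chars.isIn ['7'] pvT = true from by decide,
        show PySem.Chars.find pvT ['7'] = (0 : Int) from by decide, if_true]
      rw [PySem.List.slice_to _ (by norm_num), PySem.List.slice_from _ (by norm_num)]
      norm_num
      have hs := pv_splice (List.map (pvG p) pvT) 0 ' ' (by simp [pvT])
      norm_num at hs
      rw [hs]
      exact pv_set_eq_map p 7 '7' 0 hd (by decide) (by decide) (by decide)
    · have hd : PySem.Int.toChars (8 : Int) = ['8'] := by decide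
      simp only [pvStepA, PySem.Int.toList_toStr, hd,
        show PySem.Chars.isIn ['8'] pvT = true from by decide,
        show PySem.Chars.find pvT ['8'] = (2 : Int) from by decide, if_true]
      rw [PySem.List.slice_to _ (by norm_num), PySem.List.slice_from _ (by norm_num)]
      norm_num
      rw [show Int.toNat 2 = 2 from rfl, show Int.toNat 3 = 3 from rfl]
      have hs := pv_splice (List.map (pvG p) pvT) 2 ' ' (by simp [pvT])
      norm_num at hs
      rw [hs]
      exact pv_set_eq_map p 8 '8' 2 hd (by decide) (by decide) (by decide)
    · have hd : PySem.Int.toChars (9 : Int) = ['9'] := by decide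
      simp only [pvStepA, PySem.Int.toList_toStr, hd,
        show PySem.Chars.isIn ['9'] pvT = true from by decide,
        show PySem.Chars.find pvT ['9'] = (4 : Int) from by decide, if_true]
      rw [PySem.List.slice_to _ (by norm_num), PySem.List.slice_from _ (by norm_num)]
      norm_num
      rw [show Int.toNat 4 = 4 from rfl, show Int.toNat 5 = 5 from rfl]
      have hs := pv_splice (List.map (pvG p) pvT) 4 ' ' (by simp [pvT])
      norm_num at hs
      rw [hs]
      exact pv_set_eq_map p 9 '9' 4 hd (by decide) (by decide) (by decide)
  · have h' : PySem.Chars.isIn (PySem.Int.toStr v).toList pvT = false := by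
      rw [PySem.Int.toList_toStr]; exact Bool.not_eq_true _ ▸ eq_false_of_ne_true h
    simp only [pvStepA, h', Bool.false_eq_true, if_false]
    apply List.map_congr_left
    intro c hc
    have hne : PySem.Int.toChars v ≠ [c] := by
      intro he
      apply h
      rw [PySem.Chars.isIn_iff_infix, he]
      obtain ⟨s, t, hst⟩ := List.append_of_mem hc
      exact ⟨s, t, by rw [hst]; simp⟩
    exact (pvG_append_ne p v c hne).symm

lemma pvFold (vs : List Int) : ∀ p : List Int,
    vs.foldl (fun field v => pvStepA field (PySem.Int.toStr v)) (pvT.map (pvG p))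
      = pvT.map (pvG (p ++ vs)) := by
  induction vs with
  | nil => intro p; simp
  | cons v vs ih =>
    intro p
    simp only [List.foldl_cons]
    rw [pvStep_eq p v, ih (p ++ [v])]
    simp

-- ===== VERDICT (by name: the statement is the Claim_ definition above) =====
theorem bowling_pins_spec : Claim_equal_bowling_pins := by
  intro arr _
  show bowling_pins arr = bowling_pins_alt arr
  simp only [bowling_pins, bowling_pins_alt]
  generalize ((PySem.List.pyRange 0 (PySem.List.len arr) 1).foldl
    (fun a i => if PySem.List.pyGetD a i 0 = 10 then PySem.List.pySetD a i 0 else a) arr) = l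
  rw [show ("I I I I\n I I I \n  I I  \n   I   ".toList : List Char) = pvT.map (pvG []) from by decide]
  rw [show ("7 8 9 0\n 4 5 6 \n  2 3  \n   1   ".toList : List Char) = pvT from by decide]
  rw [show (fun (field : List Char) (s : String) =>
      if PySem.Chars.isIn s.toList pvT then
        PySem.List.slice field none (some (PySem.Chars.find pvT s.toList)) ++ [' '] ++
          PySem.List.slice field (some (PySem.Chars.find pvT s.toList + 1)) none
      else field) = pvStepA from rfl]
  rw [List.foldl_map]
  rw [pvFold l []]
  congr 1
  apply List.map_congr_left
  intro c hc
  by_cases h : ∃ v ∈ l, PySem.Int.toChars v = [c]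
  · have hmem : String.ofList [c] ∈ l.map PySem.Int.toStr := by
      obtain ⟨v, hv, he⟩ := h
      exact List.mem_map.2 ⟨v, hv, by
        have : (PySem.Int.toStr v).toList = [c] := by rw [PySem.Int.toList_toStr, he]
        rw [← this, String.ofList_toList]⟩
    rw [show PySem.Set.contains (PySem.Set.ofList (l.map PySem.Int.toStr)) (String.ofList [c]) = true
        from (PySem.Set.contains_iff _ _).2 ((PySem.Set.mem_ofList _ _).2 hmem)]
    simp only [if_true]
    rw [pvG, if_pos (by simpa using h)]
  · have hmem : String.ofList [c] ∉ l.map PySem.Int.toStr := by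
      intro hm
      obtain ⟨v, hv, he⟩ := List.mem_map.1 hm
      exact h ⟨v, hv, by rw [← PySem.Int.toList_toStr, he, String.toList_ofList]⟩
    rw [show PySem.Set.contains (PySem.Set.ofList (l.map PySem.Int.toStr)) (String.ofList [c]) = false
        from by
          rw [← Bool.not_eq_true, PySem.Set.contains_iff]
          exact fun hm => hmem ((PySem.Set.mem_ofList _ _).1 hm)]
    simp only [Bool.false_eq_true, if_false]
    rw [pvG, if_neg (by simpa using h)]
    rfl
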